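-- pv_equiv track=rewrite | github.com/AliMuhammadAsad/Grad-Chronicles | CS102-DSA/Quizzes/Quiz_5.py | isStarGraph
-- ===== SOURCE A (Python) =====
-- def isStarGraph(G): #Returns True if the graph else False
--     lst_ones, lst_center = [], []
--     for node in G:
--         if len(G[node]) == 1:
--             lst_ones.append(node)
--         elif len(G[node]) == (len(G) - 1):
--             lst_center.append(node)
--         elif len(G[node]) != 1 or len(G[node]) != (len(G) - 1):
--             return False
--     if len(lst_ones) == (len(G) - 1) and len(lst_center) == 1:
--         return True
--     else:
--         return False
-- ===== SOURCE B (Python) =====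
-- def isStarGraph(G):
--     # Degree-arithmetic check: n-1 nodes of degree 1 and total degree 2*(n-1)
--     # force the one remaining node to have degree n-1 (and excludes n == 2,
--     # where all degrees are 1). No center is ever identified.
--     degs = [len(G[node]) for node in G]
--     n = len(G)
--     return degs.count(1) == n - 1 and sum(degs) == 2 * (n - 1)
-- ===== Notes on version B (the rewrite author's own statement) =====
-- stated objective: simpler
-- what changed: B drops A's classify-into-leaf/center-lists loop entirely and instead checks two arithmetic invariants of the degree list: exactly n-1 nodes of degree 1 and total degree 2*(n-1), which together force the one remaining node to be a center; no center is ever located and no per-node branch decides the result.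
import Mathlib
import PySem

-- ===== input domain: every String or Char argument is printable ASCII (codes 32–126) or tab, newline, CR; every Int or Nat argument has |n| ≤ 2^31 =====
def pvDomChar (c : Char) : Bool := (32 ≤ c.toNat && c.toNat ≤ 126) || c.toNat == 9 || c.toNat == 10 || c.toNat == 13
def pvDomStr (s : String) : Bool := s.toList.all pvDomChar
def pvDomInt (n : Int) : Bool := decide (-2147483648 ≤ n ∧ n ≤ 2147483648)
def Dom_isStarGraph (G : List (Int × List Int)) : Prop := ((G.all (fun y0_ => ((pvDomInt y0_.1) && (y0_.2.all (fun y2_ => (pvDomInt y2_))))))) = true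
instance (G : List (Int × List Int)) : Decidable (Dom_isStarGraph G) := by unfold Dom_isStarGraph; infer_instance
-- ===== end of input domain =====

-- B replaces A's classify-into-leaf/center-lists loop by two arithmetic
-- invariants of the degree list (n-1 nodes of degree 1, total degree 2(n-1));
-- objective: simpler.

-- Shared dict primitive: `G[node]` = first-match lookup in the association list
-- (for `node` drawn from G's own keys, as both programs do, this is exact).
def pyLookup (G : List (Int × List Int)) (k : Int) : List Int :=
  match G with
  | [] => []
  | (k', v) :: rest => if k' = k then v else pyLookup rest k

-- ===== PORT A =====
-- the `for node in G` loop with its two accumulator lists and early `return False`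
def isStarGraphGo (G : List (Int × List Int)) (nodes ones ctr : List Int) : Bool :=
  match nodes with
  | [] => decide (((ones.length : Int) = (G.length : Int) - 1) ∧ ctr.length = 1)
  | node :: rest =>
      let d : Int := ((pyLookup G node).length : Int)
      if d = 1 then isStarGraphGo G rest (ones ++ [node]) ctr
      else if d = (G.length : Int) - 1 then isStarGraphGo G rest ones (ctr ++ [node])
      else if d ≠ 1 ∨ d ≠ (G.length : Int) - 1 then false
      else isStarGraphGo G rest ones ctr

def isStarGraph (G : List (Int × List Int)) : Bool :=
  isStarGraphGo G (G.map Prod.fst) [] []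

-- ===== PORT B =====
def isStarGraph_alt (G : List (Int × List Int)) : Bool :=
  let degs := (G.map Prod.fst).map (fun node => ((pyLookup G node).length : Int))
  decide ((degs.count 1 : Int) = (G.length : Int) - 1) &&
    decide (degs.sum = 2 * ((G.length : Int) - 1))

-- ===== PRECONDITION & SPEC =====
def Spec_isStarGraph (G : List (Int × List Int)) (out : Bool) : Prop := out = isStarGraph_alt G
instance (G : List (Int × List Int)) (out : Bool) : Decidable (Spec_isStarGraph G out) := by unfold Spec_isStarGraph; infer_instance

-- ===== CLAIM (what is proved, stated in full; the proofs are below) =====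
def Claim_equal_isStarGraph : Prop := ∀ (G : List (Int × List Int)), Dom_isStarGraph G → Spec_isStarGraph G (isStarGraph G)

-- ===== LEMMAS AND PROOFS =====

-- degree of node k as both ports compute it, and the tests of A's loop
def degI (G : List (Int × List Int)) (k : Int) : Int := ((pyLookup G k).length : Int)
def isLeafB (G : List (Int × List Int)) (k : Int) : Bool := decide (degI G k = 1)
def isCtrB (G : List (Int × List Int)) (k : Int) : Bool :=
  !isLeafB G k && decide (degI G k = (G.length : Int) - 1)
def okB (G : List (Int × List Int)) (k : Int) : Bool :=
  isLeafB G k || decide (degI G k = (G.length : Int) - 1)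

-- characterisation of A's loop: early-False iff some degree is outside {1, n-1},
-- otherwise the final count check with the classified nodes appended
theorem isStarGraphGo_char (G : List (Int × List Int)) (ks ones ctr : List Int) :
    isStarGraphGo G ks ones ctr =
      if ks.all (okB G) then
        decide ((((ones.length : Int) + ((ks.filter (isLeafB G)).length : Int) = (G.length : Int) - 1)
          ∧ (ctr.length + (ks.filter (isCtrB G)).length = 1)))
      else false := by
  induction ks generalizing ones ctr with
  | nil => simp [isStarGraphGo]
  | cons k rest ih =>
    simp only [isStarGraphGo]
    by_cases h1 : ((pyLookup G k).length : Int) = 1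
    · have hL : isLeafB G k = true := by simp [isLeafB, degI, h1]
      have hC : isCtrB G k = false := by simp [isCtrB, hL]
      have hO : okB G k = true := by simp [okB, hL]
      rw [if_pos h1, ih]
      rw [List.filter_cons_of_pos hL, List.filter_cons_of_neg (by simp [hC]),
        show (k :: rest).all (okB G) = rest.all (okB G) by simp [List.all_cons, hO]]
      by_cases hA : rest.all (okB G) = true
      · rw [if_pos hA, if_pos hA, decide_eq_decide]
        simp only [List.length_append, List.length_cons, List.length_nil]
        constructor <;> rintro ⟨ha, hb⟩ <;> exact ⟨by push_cast at ha ⊢; omega, hb⟩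
      · rw [if_neg hA, if_neg hA]
    · by_cases h2 : ((pyLookup G k).length : Int) = (G.length : Int) - 1
      · have hL : isLeafB G k = false := by simp [isLeafB, degI, h1]
        have hC : isCtrB G k = true := by simp [isCtrB, hL, degI, h2]
        have hO : okB G k = true := by simp [okB, degI, h2]
        rw [if_neg h1, if_pos h2, ih]
        rw [List.filter_cons_of_neg (by simp [hL]), List.filter_cons_of_pos hC,
          show (k :: rest).all (okB G) = rest.all (okB G) by simp [List.all_cons, hO]]
        by_cases hA : rest.all (okB G) = true
        · rw [if_pos hA, if_pos hA, decide_eq_decide]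
          simp only [List.length_append, List.length_cons, List.length_nil]
          constructor <;> rintro ⟨ha, hb⟩ <;> exact ⟨ha, by omega⟩
        · rw [if_neg hA, if_neg hA]
      · have hO : okB G k = false := by simp [okB, isLeafB, degI, h1, h2]
        rw [if_neg h1, if_neg h2, if_pos (Or.inl h1)]
        simp [List.all_cons, hO]

-- when every degree is 1 or n-1, A's center test coincides with the non-leaf test
theorem filter_center_eq (G : List (Int × List Int)) (ks : List Int)
    (hall : ∀ k ∈ ks, okB G k = true) :
    ks.filter (isCtrB G) = ks.filter (fun k => !isLeafB G k) := by
  apply List.filter_congr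
  intro k hk
  have h := hall k hk
  simp only [okB, Bool.or_eq_true] at h
  rcases h with h | h
  · simp [isCtrB, h]
  · simp [isCtrB, h]

-- sum of a constant list
theorem sum_const_int (l : List Int) (m : Int) (h : ∀ x ∈ l, x = m) :
    l.sum = (l.length : Int) * m := by
  induction l with
  | nil => simp
  | cons a t ih =>
    rw [List.sum_cons, ih (fun x hx => h x (List.mem_cons_of_mem a hx)),
      h a List.mem_cons_self, List.length_cons]
    push_cast; ring

-- partition of a sum by a predicate
theorem sum_filter_split (l : List Int) (p : Int → Bool) :
    l.sum = (l.filter p).sum + (l.filter (fun x => !p x)).sum := by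
  induction l with
  | nil => simp
  | cons a t ih =>
    by_cases h : p a = true
    · rw [List.filter_cons_of_pos h, List.filter_cons_of_neg (by simp [h]),
        List.sum_cons, List.sum_cons, ih]
      ring
    · rw [List.filter_cons_of_neg h, List.filter_cons_of_pos (by simp [h]),
        List.sum_cons, List.sum_cons, ih]
      ring

-- ===== VERDICT (by name: the statement is the Claim_ definition above) =====
theorem isStarGraph_spec : Claim_equal_isStarGraph := by
  intro G _
  show isStarGraph G = isStarGraph_alt G
  simp only [isStarGraph, isStarGraph_alt]
  rw [isStarGraphGo_char]
  set ks := G.map Prod.fst with hks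
  set degs := ks.map (fun node => ((pyLookup G node).length : Int)) with hdegs
  have hlen : (ks.length : Int) = (G.length : Int) := by rw [hks, List.length_map]
  -- the degree list is ks mapped through degI, so its filters come from ks's
  have hfilt : ∀ p : Int → Bool,
      degs.filter p = (ks.filter (fun k => p (degI G k))).map (degI G) := by
    intro p
    rw [hdegs, List.filter_map]
    rfl
  -- count of 1s in degs = number of leaves among ks
  have hcount : degs.count 1 = (ks.filter (isLeafB G)).length := by
    rw [List.count_eq_countP, List.countP_eq_length_filter,
      show degs.filter (fun x => x == 1) = (ks.filter (isLeafB G)).map (degI G) from hfilt _,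
      List.length_map]
  -- lengths: leaves + non-leaves = n
  have hsplitlen : ks.length = (ks.filter (isLeafB G)).length + (ks.filter (fun k => !isLeafB G k)).length :=
    List.length_eq_length_filter_add (isLeafB G)
  -- sum of degs = (#leaves) + sum of the non-leaf degrees
  have hleafsum : ((ks.filter (isLeafB G)).map (degI G)).sum = ((ks.filter (isLeafB G)).length : Int) := by
    rw [sum_const_int _ 1 (fun x hx => by
      obtain ⟨k, hk, rfl⟩ := List.mem_map.mp hx
      have := (List.mem_filter.mp hk).2
      simpa [isLeafB] using this), List.length_map]
    ring
  have hsum : degs.sum = ((ks.filter (isLeafB G)).length : Int)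
      + ((ks.filter (fun k => !isLeafB G k)).map (degI G)).sum := by
    rw [sum_filter_split degs (fun d => decide (d = 1)),
      show degs.filter (fun d => decide (d = 1)) = (ks.filter (isLeafB G)).map (degI G) from hfilt _,
      show degs.filter (fun d => !decide (d = 1)) = (ks.filter (fun k => !isLeafB G k)).map (degI G) from hfilt _,
      hleafsum]
  by_cases hall : ∀ k ∈ ks, okB G k = true
  · rw [if_pos (by simpa [List.all_eq_true] using hall)]
    rw [filter_center_eq G ks hall]
    -- every non-leaf has degree n - 1
    have hctr : ∀ x ∈ (ks.filter (fun k => !isLeafB G k)).map (degI G), x = (G.length : Int) - 1 := by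
      intro x hx
      obtain ⟨k, hk, rfl⟩ := List.mem_map.mp hx
      have hnl : isLeafB G k = false := by
        have := (List.mem_filter.mp hk).2; simpa using this
      have h := hall k (List.mem_filter.mp hk).1
      simp only [okB, hnl, Bool.false_or, decide_eq_true_eq] at h
      exact h
    have hsumctr : ((ks.filter (fun k => !isLeafB G k)).map (degI G)).sum
        = ((ks.filter (fun k => !isLeafB G k)).length : Int) * ((G.length : Int) - 1) := by
      rw [sum_const_int _ _ hctr, List.length_map]
    rcases eq_or_ne (((ks.filter (isLeafB G)).length : Int)) ((G.length : Int) - 1) with he | he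
    · have hr1 : ((ks.filter (fun k => !isLeafB G k)).length : Int) = 1 := by omega
      have hS : degs.sum = 2 * ((G.length : Int) - 1) := by
        rw [hsum, hsumctr, he, hr1]; ring
      have hA : decide ((((([] : List Int)).length : Int) + ((ks.filter (isLeafB G)).length : Int) = (G.length : Int) - 1)
          ∧ ((([] : List Int)).length + (ks.filter (fun k => !isLeafB G k)).length = 1)) = true := by
        apply decide_eq_true
        refine ⟨by simpa using he, ?_⟩
        simpa using (by omega : (ks.filter (fun k => !isLeafB G k)).length = 1)
      rw [hA, decide_eq_true (by rw [hcount]; simpa using he),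
        decide_eq_true hS, Bool.and_self]
    · have hA : decide ((((([] : List Int)).length : Int) + ((ks.filter (isLeafB G)).length : Int) = (G.length : Int) - 1)
          ∧ ((([] : List Int)).length + (ks.filter (fun k => !isLeafB G k)).length = 1)) = false := by
        apply decide_eq_false
        rintro ⟨ha, -⟩
        exact he (by simpa using ha)
      rw [hA, decide_eq_false (by rw [hcount]; intro h; exact he (by simpa using h)),
        Bool.false_and]
  · rw [if_neg (by simpa [List.all_eq_true] using hall)]
    -- some degree lies outside {1, n-1}: B's two checks cannot both hold either
    have hex : ∃ k ∈ ks, okB G k ≠ true := by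
      by_contra hne
      exact hall (fun k hk => by
        rcases Bool.eq_false_or_eq_true (okB G k) with ht | hf
        · exact ht
        · exact absurd ⟨k, hk, by simp [hf]⟩ hne)
    obtain ⟨k0, hk0, hko⟩ := hex
    have hk01 : isLeafB G k0 = false := by
      rcases Bool.eq_false_or_eq_true (isLeafB G k0) with h | h
      · exact absurd (by simp [okB, h]) hko
      · exact h
    have hk02 : ¬ degI G k0 = (G.length : Int) - 1 := by
      intro h
      exact hko (by simp [okB, h])
    symm
    rw [Bool.and_eq_false_iff]
    by_cases hc : ((degs.count 1 : Int)) = (G.length : Int) - 1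
    · right
      apply decide_eq_false
      intro hs
      have hr1 : (ks.filter (fun k => !isLeafB G k)).length = 1 := by
        rw [hcount] at hc; omega
      obtain ⟨a, ha⟩ := List.length_eq_one_iff.mp hr1
      have hk0m : k0 ∈ ks.filter (fun k => !isLeafB G k) :=
        List.mem_filter.mpr ⟨hk0, by simp [hk01]⟩
      have hk0a : k0 = a := by
        rw [ha] at hk0m; simpa using hk0m
      have hda : degs.sum = ((ks.filter (isLeafB G)).length : Int) + degI G a := by
        rw [hsum, ha]; simp
      rw [hcount] at hc
      exact hk02 (hk0a ▸ (by rw [hda] at hs; omega : degI G a = (G.length : Int) - 1))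
    · left
      exact decide_eq_false hc
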